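-- pv_equiv track=rewrite | github.com/helloworldji/decoderji | main.py | try_rot47
-- ===== SOURCE A (Python) =====
-- def try_rot47(data):
--     try:
--         if isinstance(data, str):
--             result = []
--             for char in data:
--                 if 33 <= ord(char) <= 126:
--                     result.append(chr(33 + ((ord(char) - 33 + 47) % 94)))
--                 else:
--                     result.append(char)
--             return ''.join(result)
--     except: return None
-- ===== SOURCE B (Python) =====
-- def try_rot47(data):
--     if isinstance(data, str):
--         src = ''.join(map(chr, range(33, 127)))
--         dst = src[47:] + src[:47]
--         return data.translate(str.maketrans(src, dst))
--     return None
-- ===== Notes on version B (the rewrite author's own statement) =====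
-- stated objective: idiomatic
-- what changed: B never computes the per-character (c-33+47)%94 arithmetic: it builds the substitution by rotating the printable-ASCII alphabet string with slices (src[47:]+src[:47]), zips it into a table with str.maketrans, and applies it in one str.translate pass.
import Mathlib
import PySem

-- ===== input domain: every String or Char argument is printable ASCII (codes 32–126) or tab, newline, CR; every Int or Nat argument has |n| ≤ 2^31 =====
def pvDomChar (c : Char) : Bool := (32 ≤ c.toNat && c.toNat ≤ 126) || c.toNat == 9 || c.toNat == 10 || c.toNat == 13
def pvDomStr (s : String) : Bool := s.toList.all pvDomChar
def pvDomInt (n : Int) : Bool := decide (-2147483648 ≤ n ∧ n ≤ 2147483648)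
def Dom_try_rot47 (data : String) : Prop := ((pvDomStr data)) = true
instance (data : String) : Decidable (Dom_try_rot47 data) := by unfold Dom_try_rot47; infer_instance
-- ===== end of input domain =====

-- B drops A's per-character modular arithmetic: it rotates the printable-ASCII alphabet by
-- slicing (src[47:]+src[:47]), zips it into a translation table and applies it in one pass;
-- same cost, more idiomatic. Return-value equivalence proved on Dom.

set_option maxRecDepth 10000

-- ===== PORT A =====
-- literal transliteration: build result list char by char with the if/else, then join
def try_rot47 (data : String) : Option String :=
  let result : List Char :=
    data.toList.foldl (fun result char =>
      if 33 ≤ char.toNat ∧ char.toNat ≤ 126 then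
        result ++ [Char.ofNat (33 + ((char.toNat - 33 + 47) % 94))]
      else
        result ++ [char]) []
  some (String.mk result)

-- ===== PORT B =====
-- src = ''.join(map(chr, range(33, 127)))
def rotSrc : List Char :=
  (PySem.List.pyRange 33 127 1).map (fun i => Char.ofNat i.toNat)

-- dst = src[47:] + src[:47]
def rotDst : List Char :=
  PySem.List.slice rotSrc (some 47) none ++ PySem.List.slice rotSrc none (some 47)

-- str.maketrans(src, dst): the codepoint→codepoint table from zipping the two strings
def rotTable : PySem.Dict Int Int :=
  (rotSrc.zip rotDst).foldl
    (fun d p => d.insert (Int.ofNat p.1.toNat) (Int.ofNat p.2.toNat)) PySem.Dict.empty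

-- data.translate(table): mapped codepoints are replaced, the rest pass through
def try_rot47_alt (data : String) : Option String :=
  some (String.mk (data.toList.map (fun c =>
    match rotTable.get? (Int.ofNat c.toNat) with
    | some v => Char.ofNat v.toNat
    | none => c)))

-- ===== PRECONDITION & SPEC =====
def Spec_try_rot47 (data : String) (out : Option String) : Prop := out = try_rot47_alt data
instance (data : String) (out : Option String) : Decidable (Spec_try_rot47 data out) := by unfold Spec_try_rot47; infer_instance

-- ===== CLAIM (what is proved, stated in full; the proofs are below) =====
def Claim_equal_try_rot47 : Prop := ∀ (data : String), Dom_try_rot47 data → Spec_try_rot47 data (try_rot47 data)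

-- ===== LEMMAS AND PROOFS =====

-- A's per-character step and B's table lookup
def stepA (c : Char) : Char :=
  if 33 ≤ c.toNat ∧ c.toNat ≤ 126 then Char.ofNat (33 + ((c.toNat - 33 + 47) % 94)) else c

def stepB (c : Char) : Char :=
  match rotTable.get? (Int.ofNat c.toNat) with
  | some v => Char.ofNat v.toNat
  | none => c

set_option maxRecDepth 4000 in
theorem step_agree (n : Nat) (h : n < 128) : stepA (Char.ofNat n) = stepB (Char.ofNat n) := by
  revert h
  revert n
  decide

theorem foldl_stepA (l : List Char) (acc : List Char) :
    l.foldl (fun result char =>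
      if 33 ≤ char.toNat ∧ char.toNat ≤ 126 then
        result ++ [Char.ofNat (33 + ((char.toNat - 33 + 47) % 94))]
      else
        result ++ [char]) acc = acc ++ l.map stepA := by
  induction l generalizing acc with
  | nil => simp
  | cons c t ih =>
    simp only [List.foldl_cons, List.map_cons, ih, stepA]
    split_ifs <;> simp

theorem dom_char_lt (c : Char) (h : pvDomChar c = true) : c.toNat < 128 := by
  simp [pvDomChar] at h
  omega

theorem try_rot47_spec' (data : String) (hd : Dom_try_rot47 data) :
    try_rot47 data = try_rot47_alt data := by
  unfold try_rot47 try_rot47_alt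
  rw [foldl_stepA]
  simp only [List.nil_append]
  refine congrArg (fun l => some (String.mk l)) ?_
  apply List.map_congr_left
  intro c hc
  have hdom : pvDomChar c = true := by
    have := hd
    unfold Dom_try_rot47 pvDomStr at this
    rw [List.all_eq_true] at this
    exact this c hc
  have hlt := dom_char_lt c hdom
  have := step_agree c.toNat hlt
  rw [Char.ofNat_toNat] at this
  simpa [stepA, stepB] using this

-- ===== VERDICT (by name: the statement is the Claim_ definition above) =====
theorem try_rot47_spec : Claim_equal_try_rot47 := by
  intro data hd
  unfold Spec_try_rot47
  exact try_rot47_spec' data hd
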